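-- pv_equiv track=rewrite | github.com/kennethsmithesq-dot/DriveAnalyzer-v1.3 | TEST.py | _is_clean_stack
-- ===== SOURCE A (Python) =====
-- NOTE_TO_SEMITONE = {
--     'C': 0, 'C#': 1, 'Db': 1, 'D': 2, 'D#': 3, 'Eb': 3, 'E': 4,
--     'F': 5, 'F#': 6, 'Gb': 6, 'G': 7, 'G#': 8, 'Ab': 8, 'A': 9,
--     'A#': 10, 'Bb': 10, 'B': 11
-- }
--
-- CHORDS = {
--     "C7": [0, 4, 7, 10], "C7b5": [0, 4, 6, 10], "C7#5": [0, 4, 8, 10],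
--     "Cm7": [0, 3, 7, 10], "Cø7": [0, 3, 6, 10], "C7m9noroot": [1, 4, 7, 10],
--     "C7no3": [0, 7, 10], "C7no5": [0, 4, 10], "C7noroot": [4, 7, 10],
--     "Caug": [0, 4, 8], "C": [0, 4, 7], "Cm": [0, 3, 7],
--     "Cmaj7": [0, 4, 7, 11], "CmMaj7": [0, 3, 7, 11]
-- }
--
-- def _is_clean_stack(chord_name: str, event_notes: set[int]) -> bool:
--     """
--     Returns True if all required chord notes are present and any extra notes are only outside the stack (not between lowest and highest chord tones, exclusive).
--     chord_name: e.g. "C7", "Gm", etc.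
--     event_notes: set of MIDI pitch classes (0=C, 1=C#, ..., 11=B) present at this event.
--     """
--     root = next((note for note in sorted(NOTE_TO_SEMITONE.keys(), key=lambda x: -len(x)) if chord_name.startswith(note)), None)
--     if not root:
--         return False
--     base_chord = chord_name.replace(root, 'C')
--     if base_chord not in CHORDS:
--         return False
--
--     root_pc = NOTE_TO_SEMITONE[root]
--     expected_pcs = set((root_pc + i) % 12 for i in CHORDS[base_chord])
--     event_notes = set(event_notes)
--
--     # Must contain all required chord notes
--     if not expected_pcs.issubset(event_notes):
--         return False
--
--     # If no extra notes, it's clean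
--     if event_notes == expected_pcs:
--         return True
--
--     # Find lowest and highest chord tones in the event
--     chord_tones_sorted = sorted(expected_pcs)
--     min_tone = chord_tones_sorted[0]
--     max_tone = chord_tones_sorted[-1]
--
--     # Check for extra notes that fall strictly between min and max chord tones
--     for n in event_notes - expected_pcs:
--         # Handle wrap-around (e.g., C-E-G, extra note B)
--         if min_tone < max_tone:
--             if min_tone < n < max_tone:
--                 return False
--         else:
--             # e.g., chord tones G (7), C (0), E (4): min=0, max=7, so between is 1-6
--             if (n > min_tone or n < max_tone):
--                 return False
--
--     return True
-- ===== SOURCE B (Python) =====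
-- NOTE_TO_SEMITONE = {
--     'C': 0, 'C#': 1, 'Db': 1, 'D': 2, 'D#': 3, 'Eb': 3, 'E': 4,
--     'F': 5, 'F#': 6, 'Gb': 6, 'G': 7, 'G#': 8, 'Ab': 8, 'A': 9,
--     'A#': 10, 'Bb': 10, 'B': 11
-- }
--
-- CHORDS = {
--     "C7": [0, 4, 7, 10], "C7b5": [0, 4, 6, 10], "C7#5": [0, 4, 8, 10],
--     "Cm7": [0, 3, 7, 10], "Cø7": [0, 3, 6, 10], "C7m9noroot": [1, 4, 7, 10],
--     "C7no3": [0, 7, 10], "C7no5": [0, 4, 10], "C7noroot": [4, 7, 10],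
--     "Caug": [0, 4, 8], "C": [0, 4, 7], "Cm": [0, 3, 7],
--     "Cmaj7": [0, 4, 7, 11], "CmMaj7": [0, 3, 7, 11]
-- }
--
-- def _is_clean_stack(chord_name: str, event_notes: set[int]) -> bool:
--     # Root by direct prefix slicing (2-char accidental names first, then plain letters).
--     head2, head1 = chord_name[:2], chord_name[:1]
--     if head2 in NOTE_TO_SEMITONE:
--         root = head2
--     elif head1 in NOTE_TO_SEMITONE:
--         root = head1
--     else:
--         return False
--     intervals = CHORDS.get(chord_name.replace(root, 'C'))
--     if intervals is None:
--         return False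
--     root_pc = NOTE_TO_SEMITONE[root]
--     expected = {(root_pc + i) % 12 for i in intervals}
--     lo, hi = min(expected), max(expected)
--     notes = set(event_notes)
--     # Scan the chord's span pitch class by pitch class: every chord tone must be
--     # present, every gap between the lowest and highest chord tone must be empty.
--     # Notes outside the span [lo, hi] are always allowed, so they need no check.
--     for pc in range(lo, hi + 1):
--         if pc in expected:
--             if pc not in notes:
--                 return False
--         elif pc in notes:
--             return False
--     return True
-- ===== Notes on version B (the rewrite author's own statement) =====
-- stated objective: alternative
-- what changed: B finds the root by direct prefix slicing instead of scanning all note names sorted by descending length, and replaces A's subset test + equality early-return + loop over the extra notes (with its dead wrap-around branch) by a single scan over the chord's pitch-class span range(lo, hi+1): chord tones must be present, gaps must be absent, and the event set's extras are never iterated at all.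
import Mathlib
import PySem

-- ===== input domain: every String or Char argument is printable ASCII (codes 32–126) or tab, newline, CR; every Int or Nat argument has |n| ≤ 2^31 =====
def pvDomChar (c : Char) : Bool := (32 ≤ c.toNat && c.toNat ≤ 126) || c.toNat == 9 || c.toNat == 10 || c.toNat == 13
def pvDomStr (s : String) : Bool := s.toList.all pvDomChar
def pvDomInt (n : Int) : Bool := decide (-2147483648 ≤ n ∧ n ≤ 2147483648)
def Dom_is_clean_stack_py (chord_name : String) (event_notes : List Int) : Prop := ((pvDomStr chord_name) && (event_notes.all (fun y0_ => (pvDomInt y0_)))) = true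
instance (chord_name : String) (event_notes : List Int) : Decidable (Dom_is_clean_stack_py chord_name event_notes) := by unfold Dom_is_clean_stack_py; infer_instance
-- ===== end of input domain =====

-- B replaces the sort-all-keys root scan by direct prefix slicing, and A's subset check +
-- equality early-return + loop over the extra notes by a single scan of the chord's span
-- range(lo, hi+1) (chord tones present, gaps absent); objective: alternative.


-- ===== PORT A =====
-- NOTE_TO_SEMITONE
def pvNotes : PySem.Dict String Int :=
  PySem.Dict.ofList [("C",0),("C#",1),("Db",1),("D",2),("D#",3),("Eb",3),("E",4),("F",5),("F#",6),("Gb",6),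
   ("G",7),("G#",8),("Ab",8),("A",9),("A#",10),("Bb",10),("B",11)]

-- CHORDS
def pvChords : PySem.Dict String (List Int) :=
  PySem.Dict.ofList [("C7",[0,4,7,10]),("C7b5",[0,4,6,10]),("C7#5",[0,4,8,10]),
   ("Cm7",[0,3,7,10]),("Cø7",[0,3,6,10]),("C7m9noroot",[1,4,7,10]),
   ("C7no3",[0,7,10]),("C7no5",[0,4,10]),("C7noroot",[4,7,10]),
   ("Caug",[0,4,8]),("C",[0,4,7]),("Cm",[0,3,7]),
   ("Cmaj7",[0,4,7,11]),("CmMaj7",[0,3,7,11])]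

def is_clean_stack_py (chord_name : String) (event_notes : List Int) : Bool :=
  -- root = next((note for note in sorted(keys, key=lambda x: -len(x)) if chord_name.startswith(note)), None)
  match (PySem.List.sorted pvNotes.keys (fun x => -(PySem.Str.len x : Int)) false).find?
          (fun note => PySem.Str.startswith chord_name note) with
  | none => false
  | some root =>
    let base := PySem.Str.replace chord_name root "C"
    match pvChords.get? base with
    | none => false
    | some intervals =>
      -- root came from pvNotes' keys, so this lookup cannot raise; the getD default is unreachable
      let root_pc : Int := (pvNotes.get? root).getD 0
      let expected := PySem.Set.ofList (intervals.map (fun i => PySem.Int.mod (root_pc + i) 12))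
      let notes := PySem.Set.ofList event_notes
      if ¬ (PySem.Set.issubset expected notes) then false
      else if PySem.Set.equal notes expected then true
      else
        let sortedTones := PySem.List.sorted expected (fun x => x) false
        -- expected is nonempty (every CHORDS entry is), so both indexings succeed; getD 0 is unreachable
        let min_tone : Int := (PySem.List.pyGet? sortedTones 0).getD 0
        let max_tone : Int := (PySem.List.pyGet? sortedTones (-1)).getD 0
        -- for n in event_notes - expected_pcs: … return False  (early exit = any; order-independent)
        if (PySem.Set.diff notes expected).any (fun n =>
             if min_tone < max_tone then decide (min_tone < n ∧ n < max_tone)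
             else decide (n > min_tone ∨ n < max_tone))
        then false else true

-- ===== PORT B =====
def is_clean_stack_py_alt (chord_name : String) (event_notes : List Int) : Bool :=
  let head2 := PySem.Str.slice chord_name none (some 2)
  let head1 := PySem.Str.slice chord_name none (some 1)
  match (if pvNotes.contains head2 then some head2
         else if pvNotes.contains head1 then some head1 else none : Option String) with
  | none => false
  | some root =>
    match pvChords.get? (PySem.Str.replace chord_name root "C") with
    | none => false
    | some intervals =>
      let root_pc : Int := (pvNotes.get? root).getD 0
      let expected := PySem.Set.ofList (intervals.map (fun i => PySem.Int.mod (root_pc + i) 12))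
      -- expected is nonempty, so Python's min/max cannot raise; the getD default is unreachable
      let lo : Int := (PySem.List.min? expected (fun x => x)).getD 0
      let hi : Int := (PySem.List.max? expected (fun x => x)).getD 0
      let notes := PySem.Set.ofList event_notes
      -- for pc in range(lo, hi+1): early-return loop = all over the span
      (PySem.List.pyRange lo (hi + 1) 1).all (fun pc =>
        if decide (pc ∈ expected) then decide (pc ∈ notes) else !(decide (pc ∈ notes)))

-- ===== PRECONDITION & SPEC =====
def Spec_is_clean_stack_py (chord_name : String) (event_notes : List Int) (out : Bool) : Prop := out = is_clean_stack_py_alt chord_name event_notes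
instance (chord_name : String) (event_notes : List Int) (out : Bool) : Decidable (Spec_is_clean_stack_py chord_name event_notes out) := by unfold Spec_is_clean_stack_py; infer_instance

-- ===== CLAIM (what is proved, stated in full; the proofs are below) =====
def Claim_equal_is_clean_stack_py : Prop := ∀ (chord_name : String) (event_notes : List Int), Dom_is_clean_stack_py chord_name event_notes → Spec_is_clean_stack_py chord_name event_notes (is_clean_stack_py chord_name event_notes)

-- ===== LEMMAS AND PROOFS =====

lemma pvKeysSorted_eq : PySem.List.sorted (pvNotes.keys) (fun x => -(PySem.Str.len x : Int)) false =
  ["C#","Db","D#","Eb","F#","Gb","G#","Ab","A#","Bb","C","D","E","F","G","A","B"] := by decide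

lemma pvKeys_eq : pvNotes.keys = ["C","C#","Db","D","D#","Eb","E","F","F#","Gb","G","G#","Ab","A","A#","Bb","B"] := by decide

lemma pvTL0 : "C#".toList = ['C','#'] := rfl
lemma pvTL1 : "Db".toList = ['D','b'] := rfl
lemma pvTL2 : "D#".toList = ['D','#'] := rfl
lemma pvTL3 : "Eb".toList = ['E','b'] := rfl
lemma pvTL4 : "F#".toList = ['F','#'] := rfl
lemma pvTL5 : "Gb".toList = ['G','b'] := rfl
lemma pvTL6 : "G#".toList = ['G','#'] := rfl
lemma pvTL7 : "Ab".toList = ['A','b'] := rfl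
lemma pvTL8 : "A#".toList = ['A','#'] := rfl
lemma pvTL9 : "Bb".toList = ['B','b'] := rfl
lemma pvTL10 : "C".toList = ['C'] := rfl
lemma pvTL11 : "D".toList = ['D'] := rfl
lemma pvTL12 : "E".toList = ['E'] := rfl
lemma pvTL13 : "F".toList = ['F'] := rfl
lemma pvTL14 : "G".toList = ['G'] := rfl
lemma pvTL15 : "A".toList = ['A'] := rfl
lemma pvTL16 : "B".toList = ['B'] := rfl

-- A's sorted-keys root scan and B's prefix slicing find the same root.
set_option maxHeartbeats 2000000 in
set_option maxRecDepth 8192 in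
lemma pv_root_eq (s : String) :
    (PySem.List.sorted pvNotes.keys (fun x => -(PySem.Str.len x : Int)) false).find?
        (fun note => PySem.Str.startswith s note)
    = (if pvNotes.contains (PySem.Str.slice s none (some 2)) then some (PySem.Str.slice s none (some 2))
       else if pvNotes.contains (PySem.Str.slice s none (some 1)) then some (PySem.Str.slice s none (some 1))
       else none) := by
  rw [pvKeysSorted_eq]
  rcases hl : s.toList with _ | ⟨a, _ | ⟨b, t⟩⟩
  case nil =>
    have h2 : (PySem.Str.slice s none (some 2)).toList = ([] : List Char) := by
      rw [PySem.Str.toList_slice, hl, show ((2:Int)) = ((2:Nat):Int) by norm_num]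
      simp only [PySem.Chars.slice]
      rw [PySem.List.slice_to_natCast]
      rfl
    have h1 : (PySem.Str.slice s none (some 1)).toList = ([] : List Char) := by
      rw [PySem.Str.toList_slice, hl, show ((1:Int)) = ((1:Nat):Int) by norm_num]
      simp only [PySem.Chars.slice]
      rw [PySem.List.slice_to_natCast]
      rfl
    simp only [List.find?, PySem.Str.startswith_eq, hl, pvTL0, pvTL1, pvTL2, pvTL3, pvTL4, pvTL5, pvTL6, pvTL7, pvTL8, pvTL9, pvTL10, pvTL11, pvTL12, pvTL13, pvTL14, pvTL15, pvTL16,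
      PySem.Chars.startswith, List.isPrefixOf, Bool.and_false, Bool.and_true, Bool.and_eq_true, beq_iff_eq,
      PySem.Dict.contains_eq_decide_mem_keys, pvKeys_eq, List.mem_cons, List.not_mem_nil,
      String.ext_iff, h2, h1]
    simp
  case cons.nil =>
    have h2 : (PySem.Str.slice s none (some 2)).toList = [a] := by
      rw [PySem.Str.toList_slice, hl, show ((2:Int)) = ((2:Nat):Int) by norm_num]
      simp only [PySem.Chars.slice]
      rw [PySem.List.slice_to_natCast]
      rfl
    have h1 : (PySem.Str.slice s none (some 1)).toList = [a] := by
      rw [PySem.Str.toList_slice, hl, show ((1:Int)) = ((1:Nat):Int) by norm_num]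
      simp only [PySem.Chars.slice]
      rw [PySem.List.slice_to_natCast]
      rfl
    simp only [List.find?, PySem.Str.startswith_eq, hl, pvTL0, pvTL1, pvTL2, pvTL3, pvTL4, pvTL5, pvTL6, pvTL7, pvTL8, pvTL9, pvTL10, pvTL11, pvTL12, pvTL13, pvTL14, pvTL15, pvTL16,
      PySem.Chars.startswith, List.isPrefixOf, Bool.and_false, Bool.and_true, Bool.and_eq_true, beq_iff_eq,
      PySem.Dict.contains_eq_decide_mem_keys, pvKeys_eq, List.mem_cons, List.not_mem_nil,
      String.ext_iff, h2, h1]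
    by_cases hC : a = 'C'
    · subst hC; simp [String.ext_iff, h2, h1]
    by_cases hD : a = 'D'
    · subst hD; simp [String.ext_iff, h2, h1]
    by_cases hE : a = 'E'
    · subst hE; simp [String.ext_iff, h2, h1]
    by_cases hF : a = 'F'
    · subst hF; simp [String.ext_iff, h2, h1]
    by_cases hG : a = 'G'
    · subst hG; simp [String.ext_iff, h2, h1]
    by_cases hA : a = 'A'
    · subst hA; simp [String.ext_iff, h2, h1]
    by_cases hB : a = 'B'
    · subst hB; simp [String.ext_iff, h2, h1]
    · have eC : ('C' == a) = false := beq_eq_false_iff_ne.mpr (Ne.symm hC)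
      have eD : ('D' == a) = false := beq_eq_false_iff_ne.mpr (Ne.symm hD)
      have eE : ('E' == a) = false := beq_eq_false_iff_ne.mpr (Ne.symm hE)
      have eF : ('F' == a) = false := beq_eq_false_iff_ne.mpr (Ne.symm hF)
      have eG : ('G' == a) = false := beq_eq_false_iff_ne.mpr (Ne.symm hG)
      have eA : ('A' == a) = false := beq_eq_false_iff_ne.mpr (Ne.symm hA)
      have eB : ('B' == a) = false := beq_eq_false_iff_ne.mpr (Ne.symm hB)
      simp [eC, eD, eE, eF, eG, eA, eB, hC, hD, hE, hF, hG, hA, hB]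
  case cons.cons =>
    have h2 : (PySem.Str.slice s none (some 2)).toList = [a, b] := by
      rw [PySem.Str.toList_slice, hl, show ((2:Int)) = ((2:Nat):Int) by norm_num]
      simp only [PySem.Chars.slice]
      rw [PySem.List.slice_to_natCast]
      rfl
    have h1 : (PySem.Str.slice s none (some 1)).toList = [a] := by
      rw [PySem.Str.toList_slice, hl, show ((1:Int)) = ((1:Nat):Int) by norm_num]
      simp only [PySem.Chars.slice]
      rw [PySem.List.slice_to_natCast]
      rfl
    simp only [List.find?, PySem.Str.startswith_eq, hl, pvTL0, pvTL1, pvTL2, pvTL3, pvTL4, pvTL5, pvTL6, pvTL7, pvTL8, pvTL9, pvTL10, pvTL11, pvTL12, pvTL13, pvTL14, pvTL15, pvTL16,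
      PySem.Chars.startswith, List.isPrefixOf, Bool.and_false, Bool.and_true, Bool.and_eq_true, beq_iff_eq,
      PySem.Dict.contains_eq_decide_mem_keys, pvKeys_eq, List.mem_cons, List.not_mem_nil,
      String.ext_iff, h2, h1]
    by_cases hC : a = 'C'
    · subst hC
      by_cases hsC0 : b = '#'
      · subst hsC0; simp [String.ext_iff, PySem.Str.toList_slice, PySem.Chars.slice, hl, h2, h1]
      have eC0 : ('#' == b) = false := beq_eq_false_iff_ne.mpr (Ne.symm hsC0)
      simp [String.ext_iff, PySem.Str.toList_slice, PySem.Chars.slice, hl, h2, h1, hsC0, Ne.symm hsC0, eC0]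
    by_cases hD : a = 'D'
    · subst hD
      by_cases hsD0 : b = '#'
      · subst hsD0; simp [String.ext_iff, PySem.Str.toList_slice, PySem.Chars.slice, hl, h2, h1]
      have eD0 : ('#' == b) = false := beq_eq_false_iff_ne.mpr (Ne.symm hsD0)
      by_cases hsD1 : b = 'b'
      · subst hsD1; simp [String.ext_iff, PySem.Str.toList_slice, PySem.Chars.slice, hl, h2, h1]
      have eD1 : ('b' == b) = false := beq_eq_false_iff_ne.mpr (Ne.symm hsD1)
      simp [String.ext_iff, PySem.Str.toList_slice, PySem.Chars.slice, hl, h2, h1, hsD0, Ne.symm hsD0, eD0, hsD1, Ne.symm hsD1, eD1]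
    by_cases hE : a = 'E'
    · subst hE
      by_cases hsE0 : b = 'b'
      · subst hsE0; simp [String.ext_iff, PySem.Str.toList_slice, PySem.Chars.slice, hl, h2, h1]
      have eE0 : ('b' == b) = false := beq_eq_false_iff_ne.mpr (Ne.symm hsE0)
      simp [String.ext_iff, PySem.Str.toList_slice, PySem.Chars.slice, hl, h2, h1, hsE0, Ne.symm hsE0, eE0]
    by_cases hF : a = 'F'
    · subst hF
      by_cases hsF0 : b = '#'
      · subst hsF0; simp [String.ext_iff, PySem.Str.toList_slice, PySem.Chars.slice, hl, h2, h1]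
      have eF0 : ('#' == b) = false := beq_eq_false_iff_ne.mpr (Ne.symm hsF0)
      simp [String.ext_iff, PySem.Str.toList_slice, PySem.Chars.slice, hl, h2, h1, hsF0, Ne.symm hsF0, eF0]
    by_cases hG : a = 'G'
    · subst hG
      by_cases hsG0 : b = '#'
      · subst hsG0; simp [String.ext_iff, PySem.Str.toList_slice, PySem.Chars.slice, hl, h2, h1]
      have eG0 : ('#' == b) = false := beq_eq_false_iff_ne.mpr (Ne.symm hsG0)
      by_cases hsG1 : b = 'b'
      · subst hsG1; simp [String.ext_iff, PySem.Str.toList_slice, PySem.Chars.slice, hl, h2, h1]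
      have eG1 : ('b' == b) = false := beq_eq_false_iff_ne.mpr (Ne.symm hsG1)
      simp [String.ext_iff, PySem.Str.toList_slice, PySem.Chars.slice, hl, h2, h1, hsG0, Ne.symm hsG0, eG0, hsG1, Ne.symm hsG1, eG1]
    by_cases hA : a = 'A'
    · subst hA
      by_cases hsA0 : b = '#'
      · subst hsA0; simp [String.ext_iff, PySem.Str.toList_slice, PySem.Chars.slice, hl, h2, h1]
      have eA0 : ('#' == b) = false := beq_eq_false_iff_ne.mpr (Ne.symm hsA0)
      by_cases hsA1 : b = 'b'
      · subst hsA1; simp [String.ext_iff, PySem.Str.toList_slice, PySem.Chars.slice, hl, h2, h1]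
      have eA1 : ('b' == b) = false := beq_eq_false_iff_ne.mpr (Ne.symm hsA1)
      simp [String.ext_iff, PySem.Str.toList_slice, PySem.Chars.slice, hl, h2, h1, hsA0, Ne.symm hsA0, eA0, hsA1, Ne.symm hsA1, eA1]
    by_cases hB : a = 'B'
    · subst hB
      by_cases hsB0 : b = 'b'
      · subst hsB0; simp [String.ext_iff, PySem.Str.toList_slice, PySem.Chars.slice, hl, h2, h1]
      have eB0 : ('b' == b) = false := beq_eq_false_iff_ne.mpr (Ne.symm hsB0)
      simp [String.ext_iff, PySem.Str.toList_slice, PySem.Chars.slice, hl, h2, h1, hsB0, Ne.symm hsB0, eB0]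
    have fC : ('C' == a) = false := beq_eq_false_iff_ne.mpr (Ne.symm hC)
    have fD : ('D' == a) = false := beq_eq_false_iff_ne.mpr (Ne.symm hD)
    have fE : ('E' == a) = false := beq_eq_false_iff_ne.mpr (Ne.symm hE)
    have fF : ('F' == a) = false := beq_eq_false_iff_ne.mpr (Ne.symm hF)
    have fG : ('G' == a) = false := beq_eq_false_iff_ne.mpr (Ne.symm hG)
    have fA : ('A' == a) = false := beq_eq_false_iff_ne.mpr (Ne.symm hA)
    have fB : ('B' == a) = false := beq_eq_false_iff_ne.mpr (Ne.symm hB)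
    simp [String.ext_iff, PySem.Str.toList_slice, PySem.Chars.slice, hl, hC, Ne.symm hC, hD, Ne.symm hD, hE, Ne.symm hE, hF, Ne.symm hF, hG, Ne.symm hG, hA, Ne.symm hA, hB, Ne.symm hB, fC, fD, fE, fF, fG, fA, fB, h2, h1]

-- a successful lookup's value is one of the dict's values
lemma pv_get?_mem_values {ν : Type} (d : PySem.Dict String ν) (k : String) (v : ν)
    (h : d.get? k = some v) : v ∈ d.values := by
  simp only [PySem.Dict.get?, Option.map_eq_some_iff] at h
  obtain ⟨p, hp, rfl⟩ := h
  exact List.mem_map_of_mem (List.mem_of_find?_eq_some hp)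

-- facts about the expected pitch-class set, for every root value and chord shape:
-- sorted[0] / sorted[-1] equal min / max, min < max, min and max are members, and
-- every member lies in [min, max]
lemma pv_tones :
    ∀ rp ∈ pvNotes.values, ∀ ivs ∈ pvChords.values,
      (let e := PySem.Set.ofList (ivs.map (fun i => PySem.Int.mod (rp + i) 12));
       let lo := (PySem.List.min? e (fun x => x)).getD 0;
       let hi := (PySem.List.max? e (fun x => x)).getD 0;
       let srt := PySem.List.sorted e (fun x => x) false;
       ((PySem.List.pyGet? srt 0).getD 0 = lo ∧
        (PySem.List.pyGet? srt (-1)).getD 0 = hi ∧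
        lo < hi ∧ lo ∈ e ∧ hi ∈ e ∧ ∀ x ∈ e, lo ≤ x ∧ x ≤ hi)) := by
  decide

-- the tails agree: subset + equality + extras loop  =  one pass over the span [lo, hi]
lemma pv_tail (e notes : List Int) (lo hi : Int)
    (hs0 : (PySem.List.pyGet? (PySem.List.sorted e (fun x => x) false) 0).getD 0 = lo)
    (hs1 : (PySem.List.pyGet? (PySem.List.sorted e (fun x => x) false) (-1)).getD 0 = hi)
    (hloe : lo ∈ e) (hhie : hi ∈ e) (hbd : ∀ x ∈ e, lo ≤ x ∧ x ≤ hi) (hlt : lo < hi) :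
    (if ¬ (PySem.Set.issubset e notes) then false
     else if PySem.Set.equal notes e then true
     else
       if (PySem.Set.diff notes e).any (fun n =>
            if (PySem.List.pyGet? (PySem.List.sorted e (fun x => x) false) 0).getD 0
                 < (PySem.List.pyGet? (PySem.List.sorted e (fun x => x) false) (-1)).getD 0
            then decide ((PySem.List.pyGet? (PySem.List.sorted e (fun x => x) false) 0).getD 0 < n
                 ∧ n < (PySem.List.pyGet? (PySem.List.sorted e (fun x => x) false) (-1)).getD 0)
            else decide (n > (PySem.List.pyGet? (PySem.List.sorted e (fun x => x) false) 0).getD 0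
                 ∨ n < (PySem.List.pyGet? (PySem.List.sorted e (fun x => x) false) (-1)).getD 0))
       then false else true)
    = (PySem.List.pyRange lo (hi + 1) 1).all (fun pc =>
        if decide (pc ∈ e) then decide (pc ∈ notes) else !(decide (pc ∈ notes))) := by
  rw [hs0, hs1]
  simp only [if_pos hlt]
  by_cases hsub : PySem.Set.issubset e notes = true
  · have hsub' := (PySem.Set.issubset_iff e notes).mp hsub
    rw [if_neg (not_not_intro hsub)]
    by_cases heq : PySem.Set.equal notes e = true
    · rw [if_pos heq]
      have hmem := (PySem.Set.equal_iff notes e).mp heq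
      symm
      rw [List.all_eq_true]
      intro pc hpc
      by_cases hpe : pc ∈ e
      · simp [hpe, hsub' pc hpe]
      · have hn : pc ∉ notes := fun hn => hpe ((hmem pc).mp hn)
        simp [hpe, hn]
    · rw [if_neg heq]
      rw [Bool.eq_iff_iff]
      constructor
      · intro h
        have hany : ¬ ((PySem.Set.diff notes e).any
            (fun n => decide (lo < n ∧ n < hi)) = true) := by
          intro ha
          rw [if_pos ha] at h
          exact absurd h (by simp)
        simp only [List.any_eq_true, PySem.Set.mem_diff, decide_eq_true_eq] at hany
        push_neg at hany
        rw [List.all_eq_true]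
        intro pc hpc
        have hrange := (PySem.List.mem_pyRange_one).mp hpc
        by_cases hpe : pc ∈ e
        · simp [hpe, hsub' pc hpe]
        · have hn : pc ∉ notes := by
            intro hnn
            have hlo : lo < pc := lt_of_le_of_ne hrange.1 (fun hx => hpe (hx ▸ hloe))
            have hhi : pc < hi := lt_of_le_of_ne (by omega) (fun hx => hpe (hx ▸ hhie))
            have := hany pc ⟨hnn, hpe⟩ hlo; omega
          simp [hpe, hn]
      · intro h
        rw [List.all_eq_true] at h
        have hany : ((PySem.Set.diff notes e).any
            (fun n => decide (lo < n ∧ n < hi))) = false := by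
          rw [Bool.eq_false_iff]
          intro ha
          simp only [List.any_eq_true, PySem.Set.mem_diff, decide_eq_true_eq] at ha
          obtain ⟨n, ⟨hnn, hne⟩, hlon, hnhi⟩ := ha
          have hm : n ∈ PySem.List.pyRange lo (hi + 1) 1 :=
            (PySem.List.mem_pyRange_one).mpr ⟨le_of_lt hlon, by omega⟩
          have := h n hm
          simp [hne, hnn] at this
        rw [hany]
        simp
  · rw [if_pos hsub]
    symm
    rw [Bool.eq_false_iff]
    intro hall
    apply hsub
    rw [PySem.Set.issubset_iff]
    intro x hx
    rw [List.all_eq_true] at hall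
    have hm : x ∈ PySem.List.pyRange lo (hi + 1) 1 := by
      have := hbd x hx
      exact (PySem.List.mem_pyRange_one).mpr ⟨this.1, by omega⟩
    have := hall x hm
    simpa [hx] using this

-- ===== VERDICT (by name: the statement is the Claim_ definition above) =====
theorem is_clean_stack_py_spec : Claim_equal_is_clean_stack_py := by
  intro chord_name event_notes _
  unfold Spec_is_clean_stack_py is_clean_stack_py is_clean_stack_py_alt
  dsimp only
  rw [← pv_root_eq]
  cases hroot : (PySem.List.sorted pvNotes.keys (fun x => -(PySem.Str.len x : Int)) false).find?
          (fun note => PySem.Str.startswith chord_name note) with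
  | none => rfl
  | some root =>
    dsimp only
    cases hbase : pvChords.get? (PySem.Str.replace chord_name root "C") with
    | none => rfl
    | some intervals =>
      dsimp only
      have hrp : ((pvNotes.get? root).getD 0) ∈ pvNotes.values := by
        cases hg : pvNotes.get? root with
        | none => decide
        | some v => simpa using pv_get?_mem_values pvNotes root v hg
      have hiv : intervals ∈ pvChords.values := pv_get?_mem_values pvChords _ _ hbase
      obtain ⟨t0, t1, t2, t3, t4, t5⟩ := pv_tones _ hrp intervals hiv
      exact pv_tail _ _ _ _ t0 t1 t3 t4 t5 t2
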